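-- pv_equiv track=rewrite | github.com/remekozicki/ASD | do_kolosa3/dostarcznie_paczek.py | delete_useless
-- ===== SOURCE A (Python) =====
-- def delete_useless(G,T):
--     n = len(G)
--
--     while True:
--         wyjebane = 0
--         for i in range(n):
--             if len(G[i]) == 1 and i not in T:
--                 to_del = G[i][0]
--                 G[i].remove(to_del)
--                 G[to_del].remove(i)
--                 wyjebane+=1
--
--         if wyjebane == 0:
--             return G
-- ===== SOURCE B (Python) =====
-- # Queue-based leaf elimination: track live degrees, push new non-terminal leaves, process each once.
-- # Note: A prunes rows in place; B rebuilds pruned rows (return value identical on the claimed domain).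
-- def delete_useless(G, T):
--     n = len(G)
--     term = set(T)
--     cut = [set() for _ in range(n)]      # endpoints of removed edges, per vertex
--     deg = [len(row) for row in G]        # live degree of each vertex
--     stack = [i for i in range(n) if deg[i] == 1 and i not in term]
--     while stack:
--         i = stack.pop()
--         if deg[i] != 1:
--             continue
--         j = next(v for v in G[i] if v not in cut[i])   # the unique live neighbour
--         cut[i].add(j)
--         cut[j].add(i)
--         deg[i] -= 1
--         deg[j] -= 1
--         if deg[j] == 1 and j not in term:
--             stack.append(j)
--     for i in range(n):
--         if cut[i]:
--             G[i] = [v for v in G[i] if v not in cut[i]]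
--     return G
-- ===== Notes on version B (the rewrite author's own statement) =====
-- stated objective: alternative
-- what changed: A rescans all n vertices pass after pass until a pass removes nothing; B does one queue-based elimination: it tracks live degrees and removed-edge sets, seeds a stack with the non-terminal degree-1 leaves, processes each popped leaf once (pushing its neighbour when it becomes a prunable leaf), then rebuilds the pruned rows in a final pass.
-- outside the precondition, e.g. on delete_useless([[-1], [], [0]], set()): A returns [[], [], []], B returns [[-1], [], []]; on delete_useless([[1], [0], [1]], set()): A raises ValueError, B returns [[], [], []]
import Mathlib
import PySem

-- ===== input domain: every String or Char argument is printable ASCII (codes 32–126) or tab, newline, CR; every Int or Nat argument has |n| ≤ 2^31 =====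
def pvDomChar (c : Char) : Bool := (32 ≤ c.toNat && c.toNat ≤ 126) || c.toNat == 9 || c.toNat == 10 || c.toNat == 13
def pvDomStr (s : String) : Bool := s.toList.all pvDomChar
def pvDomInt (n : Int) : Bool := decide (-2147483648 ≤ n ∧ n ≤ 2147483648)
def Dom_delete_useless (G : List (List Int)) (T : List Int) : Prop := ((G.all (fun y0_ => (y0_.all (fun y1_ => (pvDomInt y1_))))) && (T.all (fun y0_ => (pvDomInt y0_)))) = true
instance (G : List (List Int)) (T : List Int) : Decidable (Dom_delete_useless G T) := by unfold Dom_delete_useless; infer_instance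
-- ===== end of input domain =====

-- B replaces A's repeated whole-graph scans by a single queue-based leaf elimination over tracked
-- degrees (equivalence is about the RETURN value: A prunes the rows of G in place, B rebuilds them).

-- ===== PORT A =====

def pvTotLen (S : List (List Int)) : Nat := (S.map List.length).sum

def pvRemove (xs : List Int) (v : Int) : List Int := (PySem.List.remove? xs v).getD xs

def pvStepA (T : List Int) (s : List (List Int) × Int) (i : Int) : List (List Int) × Int :=
  let G := s.1
  let row := PySem.List.pyGetD G i []
  if row.length = 1 ∧ ¬ i ∈ T then
    let toDel := PySem.List.pyGetD row 0 0
    let G1 := PySem.List.pySetD G i (pvRemove row toDel)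
    let G2 := PySem.List.pySetD G1 toDel (pvRemove (PySem.List.pyGetD G1 toDel []) i)
    (G2, s.2 + 1)
  else s

def pvPassA (T : List Int) (n : Int) (G : List (List Int)) : List (List Int) × Int :=
  (PySem.List.pyRange 0 n).foldl (pvStepA T) (G, 0)

def pvLoopA (T : List Int) (n : Int) : Nat → List (List Int) → List (List Int)
  | 0, G => G
  | fuel+1, G =>
    let r := pvPassA T n G
    if r.2 = 0 then r.1 else pvLoopA T n fuel r.1

def delete_useless (G : List (List Int)) (T : List Int) : List (List Int) :=
  pvLoopA T (G.length : Int) (pvTotLen G + 1) G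

-- ===== PORT B =====

def pvLoopB (G : List (List Int)) (term : PySem.Set Int) : Nat → List (PySem.Set Int) → List Int → List Int → List (PySem.Set Int)
  | 0, cut, _, _ => cut
  | fuel+1, cut, deg, stack =>
    match stack.getLast? with
    | none => cut
    | some i =>
      let stack' := stack.dropLast
      if PySem.List.pyGetD deg i 0 = 1 then
        let cuti := PySem.List.pyGetD cut i PySem.Set.empty
        let j := ((PySem.List.pyGetD G i []).find? (fun v => !(PySem.Set.contains cuti v))).getD 0
        let cut1 := PySem.List.pySetD cut i (PySem.Set.add cuti j)
        let cut2 := PySem.List.pySetD cut1 j (PySem.Set.add (PySem.List.pyGetD cut1 j PySem.Set.empty) i)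
        let deg1 := PySem.List.pySetD deg i (PySem.List.pyGetD deg i 0 - 1)
        let deg2 := PySem.List.pySetD deg1 j (PySem.List.pyGetD deg1 j 0 - 1)
        let stack2 := if PySem.List.pyGetD deg2 j 0 = 1 ∧ ¬ PySem.Set.contains term j = true then stack' ++ [j] else stack'
        pvLoopB G term fuel cut2 deg2 stack2
      else pvLoopB G term fuel cut deg stack'

def delete_useless_alt (G : List (List Int)) (T : List Int) : List (List Int) :=
  let n := G.length
  let term := PySem.Set.ofList T
  let deg : List Int := G.map (fun row => (row.length : Int))
  let cut0 : List (PySem.Set Int) := List.replicate n PySem.Set.empty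
  let stack0 := (PySem.List.pyRange 0 (n : Int)).filter
    (fun i => PySem.List.pyGetD deg i 0 == 1 && !(PySem.Set.contains term i))
  let cutF := pvLoopB G term (n + pvTotLen G + 1) cut0 deg stack0
  G.mapIdx (fun k row =>
    let c := PySem.List.pyGetD cutF (k : Int) PySem.Set.empty
    if c = [] then row else row.filter (fun v => !(PySem.Set.contains c v)))

-- ===== PRECONDITION & SPEC =====

def SimpleSymGraph (S : List (List Int)) : Prop :=
  ∀ k : Nat, k < S.length → ∀ v ∈ S.getD k [],
    0 ≤ v ∧ v < (S.length : Int) ∧ v ≠ (k : Int) ∧ (S.getD k []).count v = 1 ∧ (k : Int) ∈ S.getD v.toNat []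

-- no vertex is a prunable (non-terminal, degree-1) leaf, so A's first pass removes nothing
def NoPrunableLeaf (G : List (List Int)) (T : List Int) : Prop :=
  ∀ k : Nat, k < G.length → ¬ ((G.getD k []).length = 1 ∧ ¬ (k : Int) ∈ T)

-- Pre_ excludes graphs that are neither simple symmetric adjacency lists nor free of prunable
-- leaves: there A can raise IndexError/ValueError, or (with negative neighbour entries) its value
-- depends on Python's negative-index wraparound.
def Pre_delete_useless (G : List (List Int)) (T : List Int) : Prop :=
  SimpleSymGraph G ∨ NoPrunableLeaf G T

instance (G : List (List Int)) (T : List Int) : Decidable (Pre_delete_useless G T) := by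
  unfold Pre_delete_useless SimpleSymGraph NoPrunableLeaf; infer_instance

def pvWitness_delete_useless : List (List Int) × List Int := ([[1], [0]], [0])

def Spec_delete_useless (G : List (List Int)) (T : List Int) (out : List (List Int)) : Prop := out = delete_useless_alt G T
instance (G : List (List Int)) (T : List Int) (out : List (List Int)) : Decidable (Spec_delete_useless G T out) := by unfold Spec_delete_useless; infer_instance

-- ===== CLAIM (what is proved, stated in full; the proofs are below) =====
def Claim_equal_delete_useless : Prop := ∀ (G : List (List Int)) (T : List Int), Dom_delete_useless G T → Pre_delete_useless G T → Spec_delete_useless G T (delete_useless G T)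

-- ===== LEMMAS AND PROOFS =====

theorem pvGetD_set {α : Type} (S : List α) (d : α) (i k : Nat) (v : α) :
    (S.set i v).getD k d = if i = k ∧ i < S.length then v else S.getD k d := by
  simp only [List.getD_eq_getElem?_getD, List.getElem?_set]
  split_ifs with h h1 h2
  all_goals simp_all
  omega

theorem pvTotLen_set (S : List (List Int)) (i : Nat) (v : List Int) (hi : i < S.length) :
    pvTotLen (S.set i v) + (S.getD i []).length = pvTotLen S + v.length := by
  induction S generalizing i with
  | nil => simp at hi
  | cons x xs ih =>
    cases i with
    | zero => simp [pvTotLen]; omega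
    | succ m =>
      have := ih m (by simpa using hi)
      simp [pvTotLen] at this ⊢
      omega

theorem pvGetD_lt {α : Type} (S : List α) (d : α) (k : Nat) (h : k < S.length) :
    S.getD k d = S[k] := by
  rw [List.getD_eq_getElem?_getD, List.getElem?_eq_getElem h]; rfl

theorem pvExt {S1 S2 : List (List Int)} (hl : S1.length = S2.length)
    (h : ∀ k : Nat, k < S1.length → S1.getD k [] = S2.getD k []) : S1 = S2 := by
  apply List.ext_getElem hl
  intro k hk1 hk2
  have := h k hk1
  rwa [List.getD_eq_getElem?_getD, List.getD_eq_getElem?_getD,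
    List.getElem?_eq_getElem hk1, List.getElem?_eq_getElem hk2] at this

def pvStepAt (S : List (List Int)) (a : Nat) : List (List Int) :=
  let j := ((S.getD a []).headD 0).toNat
  (S.set a []).set j ((S.getD j []).erase (a : Int))

def pvRemovable (T : List Int) (S : List (List Int)) (a : Nat) : Prop :=
  a < S.length ∧ (S.getD a []).length = 1 ∧ ¬ (a : Int) ∈ T

def pvStep (T : List Int) (S S' : List (List Int)) : Prop :=
  SimpleSymGraph S ∧ ∃ a, pvRemovable T S a ∧ S' = pvStepAt S a

theorem pvLeafRow {T : List Int} {S : List (List Int)} {a : Nat}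
    (hInv : SimpleSymGraph S) (hR : pvRemovable T S a) :
    ∃ jv : Int, S.getD a [] = [jv] ∧ ((S.getD a []).headD 0) = jv ∧ 0 ≤ jv ∧
      jv.toNat < S.length ∧ jv.toNat ≠ a ∧ (a : Int) ∈ S.getD jv.toNat [] := by
  obtain ⟨ha, hlen, -⟩ := hR
  obtain ⟨jv, hrow⟩ := List.length_eq_one_iff.mp hlen
  have hmem : jv ∈ S.getD a [] := by rw [hrow]; exact List.mem_singleton_self jv
  obtain ⟨h0, h1, h2, -, h4⟩ := hInv a ha jv hmem
  refine ⟨jv, hrow, by rw [hrow]; rfl, h0, by omega, by intro h; apply h2; omega, h4⟩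

theorem pvLength_stepAt (S : List (List Int)) (a : Nat) :
    (pvStepAt S a).length = S.length := by simp [pvStepAt]

theorem pvStepAt_getD {S : List (List Int)} {a : Nat} {jv : Int}
    (hrow : S.getD a [] = [jv]) (ha : a < S.length) (hj : jv.toNat < S.length) (hja : jv.toNat ≠ a) (k : Nat) :
    (pvStepAt S a).getD k [] =
      if k = a then [] else if k = jv.toNat then (S.getD jv.toNat []).erase (a : Int) else S.getD k [] := by
  unfold pvStepAt
  rw [hrow]
  simp only [List.headD_cons]
  rw [pvGetD_set, pvGetD_set]
  simp only [List.length_set]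
  by_cases h1 : k = a <;> by_cases h2 : k = jv.toNat <;> simp_all <;> split_ifs <;> simp_all

theorem pvInv_stepAt {T : List Int} {S : List (List Int)} {a : Nat}
    (hInv : SimpleSymGraph S) (hR : pvRemovable T S a) :
    SimpleSymGraph (pvStepAt S a) := by
  obtain ⟨jv, hrow, hhead, h0, hj, hja, hmem⟩ := pvLeafRow hInv hR
  obtain ⟨ha, hlen, -⟩ := hR
  have hcountA : (S.getD jv.toNat []).count (a : Int) = 1 := (hInv jv.toNat hj (a : Int) hmem).2.2.2.1
  intro k hk v hv
  rw [pvLength_stepAt] at hk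
  rw [pvStepAt_getD hrow ha hj hja] at hv
  rw [pvLength_stepAt]
  by_cases hka : k = a
  · simp [hka] at hv
  · by_cases hkj : k = jv.toNat
    · -- row jv with a erased
      rw [if_neg hka, if_pos hkj] at hv
      have hv' : v ∈ S.getD jv.toNat [] := List.mem_of_mem_erase hv
      obtain ⟨b0, b1, b2, b3, b4⟩ := hInv jv.toNat hj v hv'
      have hva : v ≠ (a : Int) := by
        intro h; rw [h] at hv
        have : ((S.getD jv.toNat []).erase (a:Int)).count (a:Int) = 0 := by
          rw [List.count_erase_self, hcountA]
        exact (List.count_eq_zero.mp this) hv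
      refine ⟨b0, b1, by rw [hkj]; exact b2, ?_, ?_⟩
      · rw [pvStepAt_getD hrow ha hj hja, if_neg hka, if_pos hkj,
          List.count_erase_of_ne hva, b3]
      · have hvna : v.toNat ≠ a := by intro h; apply hva; omega
        have hvnj : v.toNat ≠ jv.toNat := by intro h; apply b2; subst hkj; omega
        rw [pvStepAt_getD hrow ha hj hja, if_neg hvna, if_neg hvnj]
        rw [hkj]; exact b4
    · -- untouched row
      rw [if_neg hka, if_neg hkj] at hv
      obtain ⟨b0, b1, b2, b3, b4⟩ := hInv k hk v hv
      have hva : v ≠ (a : Int) := by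
        intro h
        rw [h, Int.toNat_natCast, hrow] at b4
        have : (k : Int) = jv := by simpa using b4
        apply hkj; omega
      have hvna : v.toNat ≠ a := by intro h; apply hva; omega
      refine ⟨b0, b1, b2, by rw [pvStepAt_getD hrow ha hj hja, if_neg hka, if_neg hkj]; exact b3, ?_⟩
      rw [pvStepAt_getD hrow ha hj hja, if_neg hvna]
      by_cases hvj : v.toNat = jv.toNat
      · rw [if_pos hvj]
        refine List.mem_erase_of_ne (by exact_mod_cast fun h => hka (by omega)) |>.mpr ?_
        rw [← hvj]; exact b4
      · rw [if_neg hvj]; exact b4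

theorem pvTotLen_stepAt {T : List Int} {S : List (List Int)} {a : Nat}
    (hInv : SimpleSymGraph S) (hR : pvRemovable T S a) :
    pvTotLen (pvStepAt S a) + 2 = pvTotLen S := by
  obtain ⟨jv, hrow, hhead, h0, hj, hja, hmem⟩ := pvLeafRow hInv hR
  obtain ⟨ha, hlen, -⟩ := hR
  have hdef : pvStepAt S a = (S.set a []).set jv.toNat ((S.getD jv.toNat []).erase (a : Int)) := by
    simp only [pvStepAt]
    rw [hhead]
  rw [hdef]
  have e1 := pvTotLen_set (S.set a []) jv.toNat ((S.getD jv.toNat []).erase (a : Int)) (by simpa using hj)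
  have e2 := pvTotLen_set S a [] ha
  have e3 : (S.set a []).getD jv.toNat [] = S.getD jv.toNat [] := by
    rw [pvGetD_set]; simp [Ne.symm hja]
  have e4 : ((S.getD jv.toNat []).erase (a : Int)).length = (S.getD jv.toNat []).length - 1 :=
    List.length_erase_of_mem hmem
  have e5 : 1 ≤ (S.getD jv.toNat []).length := List.length_pos_of_mem hmem
  rw [e3] at e1
  rw [hrow] at e2
  simp only [List.length_cons, List.length_nil] at e2
  omega

theorem pvStrip (T : List Int) :
    ∀ S B C, pvStep T S B → pvStep T S C →
      ∃ D, Relation.ReflGen (pvStep T) B D ∧ Relation.ReflTransGen (pvStep T) C D := by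
  rintro S B C ⟨hInv, a, hRa, rfl⟩ ⟨-, a', hRa', rfl⟩
  obtain ⟨jv, hrow, hhead, hj0, hjlt, hjne, hjsym⟩ := pvLeafRow hInv hRa
  obtain ⟨jv', hrow', hhead', hj0', hjlt', hjne', hjsym'⟩ := pvLeafRow hInv hRa'
  by_cases haa : a = a'
  · subst haa; exact ⟨pvStepAt S a, Relation.ReflGen.refl, Relation.ReflTransGen.refl⟩
  by_cases hjva : jv.toNat = a'
  · -- the two leaves are each other's neighbours: one edge, both removals coincide
    have hjv'a : jv' = (a : Int) := by
      have h := hjsym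
      rw [hjva, hrow'] at h
      exact (List.mem_singleton.mp h).symm
    have hjv : jv = (a' : Int) := by omega
    have hB : pvStepAt S a = (S.set a []).set a' [] := by
      have h : pvStepAt S a = (S.set a []).set jv.toNat ((S.getD jv.toNat []).erase (a : Int)) := by
        simp only [pvStepAt]; rw [hhead]
      rw [h, hjva, hrow', hjv'a]
      simp
    have hC : pvStepAt S a' = (S.set a' []).set a [] := by
      have h : pvStepAt S a' = (S.set a' []).set jv'.toNat ((S.getD jv'.toNat []).erase (a' : Int)) := by
        simp only [pvStepAt]; rw [hhead']
      have hjv'nat : jv'.toNat = a := by omega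
      rw [h, hjv'nat, hrow, hjv]
      simp
    refine ⟨pvStepAt S a, Relation.ReflGen.refl, ?_⟩
    have h : pvStepAt S a' = pvStepAt S a := by
      rw [hB, hC, List.set_comm ([]:List Int) ([]:List Int) (Ne.symm haa)]
    rw [h]
  · -- independent removals commute
    have hjva' : jv'.toNat ≠ a := by
      intro h
      have h2 := hjsym'
      rw [h, hrow] at h2
      have : jv = (a' : Int) := (List.mem_singleton.mp h2).symm
      omega
    obtain ⟨ha, hlen, hT⟩ := hRa
    obtain ⟨ha', hlen', hT'⟩ := hRa'
    have hInvB := pvInv_stepAt hInv ⟨ha, hlen, hT⟩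
    have hInvC := pvInv_stepAt hInv ⟨ha', hlen', hT'⟩
    have rowsB := pvStepAt_getD hrow ha hjlt hjne
    have rowsC := pvStepAt_getD hrow' ha' hjlt' hjne'
    have hBrow : (pvStepAt S a).getD a' [] = [jv'] := by
      rw [rowsB a', if_neg (Ne.symm haa), if_neg (by omega : ¬ a' = jv.toNat)]
      exact hrow'
    have hCrow : (pvStepAt S a').getD a [] = [jv] := by
      rw [rowsC a, if_neg haa, if_neg (by omega : ¬ a = jv'.toNat)]
      exact hrow
    have hRBa' : pvRemovable T (pvStepAt S a) a' := ⟨by rw [pvLength_stepAt]; exact ha', by rw [hBrow]; rfl, hT'⟩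
    have hRCa : pvRemovable T (pvStepAt S a') a := ⟨by rw [pvLength_stepAt]; exact ha, by rw [hCrow]; rfl, hT⟩
    refine ⟨pvStepAt (pvStepAt S a) a', Relation.ReflGen.single ⟨hInvB, a', hRBa', rfl⟩,
      Relation.ReflTransGen.single ⟨hInvC, a, hRCa, ?_⟩⟩
    -- commutation: the two removals touch disjoint or commuting rows
    have rowsBB := pvStepAt_getD hBrow (by rw [pvLength_stepAt]; exact ha')
      (by rw [pvLength_stepAt]; exact hjlt') hjne'
    have rowsCC := pvStepAt_getD hCrow (by rw [pvLength_stepAt]; exact ha)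
      (by rw [pvLength_stepAt]; exact hjlt) hjne
    have hBj' : (pvStepAt S a).getD jv'.toNat [] =
        if jv'.toNat = jv.toNat then (S.getD jv.toNat []).erase (a : Int) else S.getD jv'.toNat [] := by
      rw [rowsB jv'.toNat, if_neg hjva']
    have hCj : (pvStepAt S a').getD jv.toNat [] =
        if jv.toNat = jv'.toNat then (S.getD jv'.toNat []).erase (a' : Int) else S.getD jv.toNat [] := by
      rw [rowsC jv.toNat, if_neg hjva]
    apply pvExt (by simp [pvLength_stepAt])
    intro k hk
    rw [pvLength_stepAt, pvLength_stepAt] at hk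
    rw [rowsCC k, rowsBB k, hBj', hCj, rowsB k, rowsC k]
    clear rowsB rowsC rowsBB rowsCC hBj' hCj hInvB hInvC hInv hjsym hjsym' hrow hrow' hhead hhead' hlen hlen'
    by_cases hch : jv.toNat = jv'.toNat
    · have heq : jv = jv' := by omega
      subst heq
      split_ifs <;> first | rfl | omega | exact List.erase_comm _ _
    · split_ifs <;> first | rfl | omega

def pvNormal (T : List Int) (S : List (List Int)) : Prop := ∀ a : Nat, ¬ pvRemovable T S a

theorem pvNF_unique {T : List Int} {S B C : List (List Int)}
    (hB : Relation.ReflTransGen (pvStep T) S B) (hC : Relation.ReflTransGen (pvStep T) S C)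
    (nB : pvNormal T B) (nC : pvNormal T C) : B = C := by
  obtain ⟨D, hBD, hCD⟩ := Relation.church_rosser (pvStrip T) hB hC
  have stop : ∀ X Y, pvNormal T X → Relation.ReflTransGen (pvStep T) X Y → X = Y := by
    intro X Y nX h
    rcases h.cases_head with rfl | ⟨c, hs, -⟩
    · rfl
    · exact absurd hs.2 (by rintro ⟨a, ha, -⟩; exact nX a ha)
  rw [stop B D nB hBD, stop C D nC hCD]

theorem pvStepA_spec_pos {T : List Int} {G : List (List Int)} {w : Int} {i : Int}
    (hInv : SimpleSymGraph G) (h0 : 0 ≤ i)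
    (hR : pvRemovable T G i.toNat) :
    pvStepA T (G, w) i = (pvStepAt G i.toNat, w + 1) := by
  obtain ⟨jv, hrow, hhead, hj0, hjlt, hjne, hjsym⟩ := pvLeafRow hInv hR
  obtain ⟨ha, hlen, hT⟩ := hR
  have hcast : ((i.toNat : Nat) : Int) = i := Int.toNat_of_nonneg h0
  simp only [pvStepA]
  rw [PySem.List.pyGetD_of_nonneg _ _ h0]
  rw [if_pos ⟨hlen, by rwa [hcast] at hT⟩]
  rw [hrow]
  have h1 : PySem.List.pyGetD [jv] 0 0 = jv := by simp [PySem.List.pyGetD_of_nonneg]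
  rw [h1]
  have h2 : pvRemove [jv] jv = [] := by simp [pvRemove]
  rw [h2]
  rw [PySem.List.pySetD_of_nonneg _ _ h0]
  rw [PySem.List.pyGetD_of_nonneg _ _ hj0, PySem.List.pySetD_of_nonneg _ _ hj0]
  have h3 : (G.set i.toNat []).getD jv.toNat [] = G.getD jv.toNat [] := by
    rw [pvGetD_set]; simp [Ne.symm hjne]
  rw [h3]
  have h4 : pvRemove (G.getD jv.toNat []) i = (G.getD jv.toNat []).erase i := by
    unfold pvRemove
    rw [PySem.List.remove?_eq_some_erase _ i (by rwa [hcast] at hjsym)]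
    rfl
  rw [h4]
  have h5 : pvStepAt G i.toNat = (G.set i.toNat []).set jv.toNat ((G.getD jv.toNat []).erase (i.toNat : Int)) := by
    simp only [pvStepAt]; rw [hhead]
  rw [h5, hcast]

theorem pvStepA_spec_neg {T : List Int} {G : List (List Int)} {w : Int} {i : Int}
    (h0 : 0 ≤ i) (h1 : i < (G.length : Int))
    (hR : ¬ pvRemovable T G i.toNat) :
    pvStepA T (G, w) i = (G, w) := by
  simp only [pvStepA]
  rw [PySem.List.pyGetD_of_nonneg _ _ h0]
  rw [if_neg]
  intro ⟨c1, c2⟩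
  exact hR ⟨by omega, c1, by rwa [Int.toNat_of_nonneg h0]⟩

theorem pvPassA_fold {T : List Int} (n : Nat) :
    ∀ (idxs : List Int) (cur : List (List Int)) (w : Int),
      SimpleSymGraph cur → cur.length = n → (∀ i ∈ idxs, 0 ≤ i ∧ i < (n : Int)) →
      Relation.ReflTransGen (pvStep T) cur (idxs.foldl (pvStepA T) (cur, w)).1 ∧
      SimpleSymGraph (idxs.foldl (pvStepA T) (cur, w)).1 ∧
      (idxs.foldl (pvStepA T) (cur, w)).1.length = n ∧
      w ≤ (idxs.foldl (pvStepA T) (cur, w)).2 ∧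
      ((idxs.foldl (pvStepA T) (cur, w)).2 = w →
        (idxs.foldl (pvStepA T) (cur, w)).1 = cur ∧ ∀ i ∈ idxs, ¬ pvRemovable T cur i.toNat) ∧
      (w < (idxs.foldl (pvStepA T) (cur, w)).2 →
        pvTotLen (idxs.foldl (pvStepA T) (cur, w)).1 + 2 ≤ pvTotLen cur) := by
  intro idxs
  induction idxs with
  | nil =>
    intro cur w hInv hlen _
    simp only [List.foldl_nil]
    refine ⟨Relation.ReflTransGen.refl, hInv, hlen, le_refl _, ?_, by omega⟩
    intro _
    exact ⟨trivial, fun x hx => absurd hx List.not_mem_nil⟩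
  | cons i idxs ih =>
    intro cur w hInv hlen hb
    have hbi := hb i (List.mem_cons_self)
    have hbrest : ∀ x ∈ idxs, 0 ≤ x ∧ x < (n : Int) := fun x hx => hb x (List.mem_cons_of_mem _ hx)
    simp only [List.foldl_cons]
    by_cases hR : pvRemovable T cur i.toNat
    · rw [pvStepA_spec_pos hInv hbi.1 hR]
      have hInv' := pvInv_stepAt hInv hR
      have hlen' : (pvStepAt cur i.toNat).length = n := by rw [pvLength_stepAt]; exact hlen
      have htot := pvTotLen_stepAt hInv hR
      obtain ⟨r1, r2, r3, r4, r5, r6⟩ := ih (pvStepAt cur i.toNat) (w + 1) hInv' hlen' hbrest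
      refine ⟨Relation.ReflTransGen.head ⟨hInv, i.toNat, hR, rfl⟩ r1, r2, r3, by omega, ?_, ?_⟩
      · intro h; omega
      · intro _
        rcases lt_or_eq_of_le r4 with h | h
        · have := r6 h; omega
        · rw [← h] at r5
          obtain ⟨e, -⟩ := r5 rfl
          rw [e]; omega
    · rw [pvStepA_spec_neg hbi.1 (by rw [hlen]; exact hbi.2) hR]
      obtain ⟨r1, r2, r3, r4, r5, r6⟩ := ih cur w hInv hlen hbrest
      refine ⟨r1, r2, r3, r4, ?_, r6⟩
      intro h
      obtain ⟨e1, e2⟩ := r5 h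
      exact ⟨e1, by
        intro x hx
        rcases List.mem_cons.mp hx with rfl | hx'
        · exact hR
        · exact e2 x hx'⟩

theorem pvLoopA_spec {T : List Int} {n : Nat} :
    ∀ (fuel : Nat) (cur : List (List Int)),
      SimpleSymGraph cur → cur.length = n → pvTotLen cur < 2 * fuel →
      Relation.ReflTransGen (pvStep T) cur (pvLoopA T (n : Int) fuel cur) ∧
      pvNormal T (pvLoopA T (n : Int) fuel cur) := by
  intro fuel
  induction fuel with
  | zero => intro cur _ _ h; omega
  | succ fuel ih =>
    intro cur hInv hlen hfuel
    have hb : ∀ i ∈ PySem.List.pyRange 0 (n : Int), 0 ≤ i ∧ i < (n : Int) := by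
      intro i hi; exact PySem.List.mem_pyRange_one.mp hi
    obtain ⟨r1, r2, r3, r4, r5, r6⟩ := pvPassA_fold n (PySem.List.pyRange 0 (n : Int)) cur 0 hInv hlen hb
    show _ ∧ _
    simp only [pvLoopA, pvPassA]
    by_cases hw : ((PySem.List.pyRange 0 (n : Int)).foldl (pvStepA T) (cur, 0)).2 = 0
    · rw [if_pos hw]
      obtain ⟨e1, e2⟩ := r5 hw
      rw [e1]
      refine ⟨Relation.ReflTransGen.refl, ?_⟩
      intro a hRa
      have ha : a < n := by rw [← hlen]; exact hRa.1
      have : (a : Int) ∈ PySem.List.pyRange 0 (n : Int) := by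
        rw [PySem.List.mem_pyRange_one]; omega
      have := e2 (a : Int) this
      rw [Int.toNat_natCast] at this
      exact this hRa
    · rw [if_neg hw]
      have hlt : 0 < ((PySem.List.pyRange 0 (n : Int)).foldl (pvStepA T) (cur, 0)).2 := by
        rcases lt_or_eq_of_le r4 with h | h
        · exact h
        · exact absurd h.symm hw
      have := r6 hlt
      obtain ⟨s1, s2⟩ := ih _ r2 r3 (by omega)
      exact ⟨Relation.ReflTransGen.trans r1 s1, s2⟩

theorem pvPassA_noop {T : List Int} {G : List (List Int)}
    (h : ∀ k : Nat, k < G.length → ¬ ((G.getD k []).length = 1 ∧ ¬ (k : Int) ∈ T)) :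
    pvPassA T (G.length : Int) G = (G, 0) := by
  unfold pvPassA
  have hgen : ∀ idxs : List Int, (∀ i ∈ idxs, 0 ≤ i ∧ i < (G.length : Int)) →
      idxs.foldl (pvStepA T) (G, 0) = (G, 0) := by
    intro idxs
    induction idxs with
    | nil => intro _; rfl
    | cons i idxs ih =>
      intro hb
      have hbi := hb i (List.mem_cons_self)
      simp only [List.foldl_cons]
      have : pvStepA T (G, 0) i = (G, 0) := by
        simp only [pvStepA]
        rw [PySem.List.pyGetD_of_nonneg _ _ hbi.1]
        rw [if_neg]
        intro ⟨c1, c2⟩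
        exact h i.toNat (by omega) ⟨c1, by rwa [Int.toNat_of_nonneg hbi.1]⟩
      rw [this]
      exact ih (fun x hx => hb x (List.mem_cons_of_mem _ hx))
  exact hgen _ (fun i hi => PySem.List.mem_pyRange_one.mp hi)

def pvLive (G : List (List Int)) (cut : List (PySem.Set Int)) : List (List Int) :=
  G.mapIdx (fun k row => row.filter (fun v => !(PySem.Set.contains (cut.getD k []) v)))

theorem pvLive_length (G : List (List Int)) (cut : List (PySem.Set Int)) :
    (pvLive G cut).length = G.length := by simp [pvLive]

theorem pvLive_getD (G : List (List Int)) (cut : List (PySem.Set Int)) (k : Nat) (hk : k < G.length) :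
    (pvLive G cut).getD k [] = (G.getD k []).filter (fun v => !(PySem.Set.contains (cut.getD k []) v)) := by
  have hk' : k < (pvLive G cut).length := by rw [pvLive_length]; exact hk
  rw [pvGetD_lt _ _ _ hk', pvGetD_lt _ _ _ hk]
  simp only [pvLive, List.getElem_mapIdx]

theorem pvFilter_add (l : List Int) (s : PySem.Set Int) (x : Int) :
    l.filter (fun v => !(PySem.Set.contains (PySem.Set.add s x) v)) =
      (l.filter (fun v => !(PySem.Set.contains s v))).filter (fun v => !(v == x)) := by
  rw [List.filter_filter]
  apply List.filter_congr
  intro v _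
  by_cases h1 : v ∈ s <;> by_cases h2 : v = x <;>
    simp_all [PySem.Set.mem_add]

theorem pvGetD_replicate (n k : Nat) : (List.replicate n (PySem.Set.empty : PySem.Set Int)).getD k [] = [] := by
  rw [List.getD_eq_getElem?_getD, List.getElem?_replicate]
  split_ifs <;> rfl

theorem pvLive_empty (G : List (List Int)) :
    pvLive G (List.replicate G.length PySem.Set.empty) = G := by
  apply pvExt (pvLive_length _ _)
  intro k hk
  rw [pvLive_length] at hk
  rw [pvLive_getD _ _ _ hk, pvGetD_replicate]
  simp [PySem.Set.contains]

theorem pvNodup_row {S : List (List Int)} (hSym : SimpleSymGraph S) {k : Nat} (hk : k < S.length) :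
    (S.getD k []).Nodup := by
  rw [List.nodup_iff_count_le_one]
  intro v
  by_cases hv : v ∈ S.getD k []
  · rw [(hSym k hk v hv).2.2.2.1]
  · rw [List.count_eq_zero.mpr hv]; omega

theorem pvLive_step {G : List (List Int)} {cut : List (PySem.Set Int)} {T : List Int}
    (hclen : cut.length = G.length) (hSym : SimpleSymGraph (pvLive G cut))
    {a : Nat} (hRem : pvRemovable T (pvLive G cut) a)
    {jv : Int} (hrow : (pvLive G cut).getD a [] = [jv]) (_hj0 : 0 ≤ jv)
    (hb : jv.toNat < G.length) (hjne : jv.toNat ≠ a)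
    (hjsym : (a : Int) ∈ (pvLive G cut).getD jv.toNat []) :
    pvLive G ((cut.set a (PySem.Set.add (cut.getD a []) jv)).set jv.toNat
        (PySem.Set.add (cut.getD jv.toNat []) (a : Int))) =
      pvStepAt (pvLive G cut) a := by
  have haN : a < G.length := by have := hRem.1; rwa [pvLive_length] at this
  have hjlt : jv.toNat < (pvLive G cut).length := by rwa [pvLive_length]
  apply pvExt (by rw [pvLive_length, pvLength_stepAt, pvLive_length])
  intro k hk
  rw [pvLive_length] at hk
  rw [pvLive_getD _ _ _ hk, pvStepAt_getD hrow (by rwa [pvLive_length]) hjlt hjne k]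
  have hcl2 : (cut.set a (PySem.Set.add (cut.getD a []) jv)).length = G.length := by
    rw [List.length_set]; exact hclen
  by_cases hka : k = a
  · subst hka
    rw [if_pos rfl]
    rw [pvGetD_set, if_neg (by intro ⟨h1, _⟩; exact hjne h1), pvGetD_set,
      if_pos ⟨rfl, by rwa [hclen]⟩]
    rw [pvFilter_add, ← pvLive_getD _ _ _ haN, hrow]
    simp
  · by_cases hkb : k = jv.toNat
    · subst hkb
      rw [if_neg hka, if_pos rfl]
      rw [pvGetD_set, if_pos ⟨rfl, by rw [hcl2]; exact hb⟩]
      rw [pvFilter_add, ← pvLive_getD _ _ _ hb]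
      rw [(pvNodup_row hSym hjlt).erase_eq_filter]
      rfl
    · rw [if_neg hka, if_neg hkb]
      rw [pvGetD_set, if_neg (by intro ⟨h1, _⟩; exact hkb h1.symm), pvGetD_set,
        if_neg (by intro ⟨h1, _⟩; exact hka h1.symm)]
      rw [← pvLive_getD _ _ _ hk]

def pvInvB (G : List (List Int)) (T : List Int) (cut : List (PySem.Set Int)) (deg : List Int) (stack : List Int) : Prop :=
  SimpleSymGraph (pvLive G cut) ∧
  cut.length = G.length ∧ deg.length = G.length ∧
  (∀ k : Nat, k < G.length → deg.getD k 0 = (((pvLive G cut).getD k []).length : Int)) ∧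
  (∀ i ∈ stack, 0 ≤ i ∧ i < (G.length : Int) ∧ ¬ i ∈ T) ∧
  (∀ k : Nat, pvRemovable T (pvLive G cut) k → (k : Int) ∈ stack) ∧
  Relation.ReflTransGen (pvStep T) G (pvLive G cut)

theorem pvLoopB_spec {G : List (List Int)} {T : List Int} :
    ∀ (fuel : Nat) (cut : List (PySem.Set Int)) (deg : List Int) (stack : List Int),
      pvInvB G T cut deg stack →
      stack.length + pvTotLen (pvLive G cut) < fuel →
      Relation.ReflTransGen (pvStep T) G (pvLive G (pvLoopB G (PySem.Set.ofList T) fuel cut deg stack)) ∧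
      pvNormal T (pvLive G (pvLoopB G (PySem.Set.ofList T) fuel cut deg stack)) := by
  intro fuel
  induction fuel with
  | zero => intro cut deg stack _ h; omega
  | succ fuel ih =>
    intro cut deg stack hInvB hfuel
    obtain ⟨hSym, hclen, hdlen, hdeg, hstk, hcov, hreach⟩ := hInvB
    cases hgl : stack.getLast? with
    | none =>
      have hnil : stack = [] := List.getLast?_eq_none_iff.mp hgl
      simp only [pvLoopB, hgl]
      refine ⟨hreach, ?_⟩
      intro a hRa
      have := hcov a hRa
      rw [hnil] at this
      exact absurd this List.not_mem_nil
    | some i =>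
      obtain ⟨stk', rfl⟩ := List.getLast?_eq_some_iff.mp hgl
      obtain ⟨hi0, hin, hiT⟩ := hstk i (by simp)
      have hcasti : ((i.toNat : Nat) : Int) = i := Int.toNat_of_nonneg hi0
      set a := i.toNat with ha_def
      have haN : a < G.length := by omega
      have hdg_eq : PySem.List.pyGetD deg i 0 = deg.getD a 0 :=
        PySem.List.pyGetD_of_nonneg _ _ hi0
      simp only [pvLoopB, hgl, hdg_eq, List.dropLast_concat]
      by_cases hdg : deg.getD a 0 = 1
      · rw [if_pos hdg]
        -- a is a live non-terminal leaf: one abstract step happens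
        have hRem : pvRemovable T (pvLive G cut) a := by
          refine ⟨by rw [pvLive_length]; exact haN, ?_, by rwa [hcasti]⟩
          have := hdeg a haN
          omega
        obtain ⟨jv, hrow, hhead, hj0, hjlt, hjne, hjsym⟩ := pvLeafRow hSym hRem
        have hb : jv.toNat < G.length := by rwa [pvLive_length] at hjlt
        have hcastj : ((jv.toNat : Nat) : Int) = jv := Int.toNat_of_nonneg hj0
        set b := jv.toNat with hb_def
        -- the port's j is jv
        have hcuti : PySem.List.pyGetD cut i PySem.Set.empty = cut.getD a [] := by
          rw [PySem.List.pyGetD_of_nonneg _ _ hi0, pvGetD_lt _ _ _ (by omega : a < cut.length),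
            pvGetD_lt _ _ _ (by omega : a < cut.length)]
        have hrowG : PySem.List.pyGetD G i [] = G.getD a [] :=
          PySem.List.pyGetD_of_nonneg _ _ hi0
        have hj : ((PySem.List.pyGetD G i []).find?
            (fun v => !(PySem.Set.contains (PySem.List.pyGetD cut i PySem.Set.empty) v))).getD 0 = jv := by
          rw [hrowG, hcuti, ← List.head?_filter, ← pvLive_getD _ _ _ haN, hrow]
          rfl
        rw [hj]
        -- normalise the updated state to plain List.set / List.getD form
        simp only [PySem.Set.empty, PySem.List.pySetD_of_nonneg _ _ hi0,
          PySem.List.pySetD_of_nonneg _ _ hj0, PySem.List.pyGetD_of_nonneg _ _ hi0,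
          PySem.List.pyGetD_of_nonneg _ _ hj0, ← ha_def, ← hb_def]
        rw [← hcasti]
        have hcut1norm : (cut.set a (PySem.Set.add (cut.getD a []) jv)).getD b [] = cut.getD b [] := by
          rw [pvGetD_set, if_neg (by intro ⟨h1, _⟩; exact hjne h1.symm)]
        rw [hcut1norm, hdg]
        have hdeg1b : (deg.set a (1 - 1)).getD b 0 = deg.getD b 0 := by
          rw [pvGetD_set, if_neg (by intro ⟨h1, _⟩; exact hjne h1.symm)]
        rw [hdeg1b]
        have hdeg2b : ((deg.set a (1 - 1)).set b (deg.getD b 0 - 1)).getD b 0 = deg.getD b 0 - 1 := by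
          rw [pvGetD_set, if_pos ⟨rfl, by rw [List.length_set]; omega⟩]
        rw [hdeg2b]
        -- new live graph is one abstract step
        have hlive2 := pvLive_step hclen hSym hRem hrow hj0 hb hjne hjsym
        have hstep : pvStep T (pvLive G cut) (pvLive G ((cut.set a (PySem.Set.add (cut.getD a []) jv)).set b (PySem.Set.add (cut.getD b []) (a : Int)))) := by
          rw [hlive2]; exact ⟨hSym, a, hRem, rfl⟩
        have htot2 : pvTotLen (pvLive G ((cut.set a (PySem.Set.add (cut.getD a []) jv)).set b (PySem.Set.add (cut.getD b []) (a : Int)))) + 2 = pvTotLen (pvLive G cut) := by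
          rw [hlive2]; exact pvTotLen_stepAt hSym hRem
        -- invariant for the recursive call
        have hrows2 := pvStepAt_getD hrow (by rw [pvLive_length]; exact haN) hjlt hjne
        have hInvB2 : ∀ stack2 : List Int,
            (∀ x ∈ stack2, 0 ≤ x ∧ x < (G.length : Int) ∧ ¬ x ∈ T) →
            (∀ k : Nat, pvRemovable T (pvLive G ((cut.set a (PySem.Set.add (cut.getD a []) jv)).set b (PySem.Set.add (cut.getD b []) (a : Int)))) k → (k : Int) ∈ stack2) →
            pvInvB G T ((cut.set a (PySem.Set.add (cut.getD a []) jv)).set b (PySem.Set.add (cut.getD b []) (a : Int))) ((deg.set a (1 - 1)).set b (deg.getD b 0 - 1)) stack2 := by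
          intro stack2 hs1 hs2
          refine ⟨by rw [hlive2]; exact pvInv_stepAt hSym hRem,
            by simp [hclen], by simp [hdlen], ?_, hs1, hs2,
            Relation.ReflTransGen.tail hreach hstep⟩
          intro k hk
          rw [hlive2, hrows2 k]
          by_cases hka : k = a
          · subst hka
            rw [if_pos rfl, pvGetD_set, if_neg (by intro ⟨h1, _⟩; exact hjne h1), pvGetD_set,
              if_pos ⟨rfl, by omega⟩]
            simp
          · by_cases hkb : k = b
            · subst hkb
              rw [if_neg hka, if_pos rfl, pvGetD_set, if_pos ⟨rfl, by rw [List.length_set]; omega⟩]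
              have hlen_er : (((pvLive G cut).getD b []).erase (a : Int)).length = ((pvLive G cut).getD b []).length - 1 :=
                List.length_erase_of_mem hjsym
              have hpos : 1 ≤ ((pvLive G cut).getD b []).length := List.length_pos_of_mem hjsym
              have := hdeg b hb
              rw [hlen_er]
              omega
            · rw [if_neg hka, if_neg hkb, pvGetD_set, if_neg (by intro ⟨h1, _⟩; exact hkb h1.symm),
                pvGetD_set, if_neg (by intro ⟨h1, _⟩; exact hka h1.symm)]
              exact hdeg k hk
        -- coverage helper for untouched vertices
        have hcov2 : ∀ k : Nat, k ≠ a → k ≠ b →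
            pvRemovable T (pvLive G ((cut.set a (PySem.Set.add (cut.getD a []) jv)).set b (PySem.Set.add (cut.getD b []) (a : Int)))) k → (k : Int) ∈ stk' := by
          intro k hka hkb hRk
          obtain ⟨hk1, hk2, hk3⟩ := hRk
          rw [pvLive_length] at hk1
          rw [hlive2] at hk2
          rw [hrows2 k, if_neg hka, if_neg hkb] at hk2
          have : (k : Int) ∈ stk' ++ [i] := hcov k ⟨by rwa [pvLive_length], hk2, hk3⟩
          rcases List.mem_append.mp this with h | h
          · exact h
          · exfalso; apply hka
            have : (k : Int) = i := List.mem_singleton.mp h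
            omega
        have h2 : (stk' ++ [i]).length = stk'.length + 1 := by simp
        have hmeas1 : (stk' ++ [jv]).length + pvTotLen (pvLive G ((cut.set a (PySem.Set.add (cut.getD a []) jv)).set b (PySem.Set.add (cut.getD b []) (a : Int)))) < fuel := by
          have h1 : (stk' ++ [jv]).length = stk'.length + 1 := by simp
          omega
        have hmeas2 : stk'.length + pvTotLen (pvLive G ((cut.set a (PySem.Set.add (cut.getD a []) jv)).set b (PySem.Set.add (cut.getD b []) (a : Int)))) < fuel := by
          omega
        -- the push guard
        by_cases hpush : deg.getD b 0 - 1 = 1 ∧ ¬ PySem.Set.contains (PySem.Set.ofList T) jv = true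
        · rw [if_pos hpush]
          have hjvT : ¬ jv ∈ T := by
            have := hpush.2
            rwa [PySem.Set.contains_iff, PySem.Set.mem_ofList] at this
          have := ih _ _ _ (hInvB2 (stk' ++ [jv])
            (by
              intro x hx
              rcases List.mem_append.mp hx with h | h
              · exact hstk x (List.mem_append_left _ h)
              · have : x = jv := List.mem_singleton.mp h
                subst this
                exact ⟨hj0, by omega, hjvT⟩)
            (by
              intro k hRk
              by_cases hka : k = a
              · exfalso
                subst hka
                obtain ⟨-, hk2, -⟩ := hRk
                rw [hlive2, hrows2 a, if_pos rfl] at hk2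
                simp at hk2
              · by_cases hkb : k = b
                · subst hkb
                  apply List.mem_append_right
                  rw [hcastj]
                  exact List.mem_singleton_self _
                · exact List.mem_append_left _ (hcov2 k hka hkb hRk)))
            hmeas1
          exact this
        · rw [if_neg hpush]
          have := ih _ _ _ (hInvB2 stk'
            (fun x hx => hstk x (List.mem_append_left _ hx))
            (by
              intro k hRk
              by_cases hka : k = a
              · exfalso
                subst hka
                obtain ⟨-, hk2, -⟩ := hRk
                rw [hlive2, hrows2 a, if_pos rfl] at hk2
                simp at hk2
              · by_cases hkb : k = b
                · exfalso
                  subst hkb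
                  apply hpush
                  obtain ⟨-, hk2, hk3⟩ := hRk
                  rw [hlive2, hrows2 b, if_neg hka, if_pos rfl] at hk2
                  constructor
                  · have hlen_er : (((pvLive G cut).getD b []).erase (a : Int)).length = ((pvLive G cut).getD b []).length - 1 :=
                      List.length_erase_of_mem hjsym
                    rw [hlen_er] at hk2
                    have hpos : 1 ≤ ((pvLive G cut).getD b []).length := List.length_pos_of_mem hjsym
                    have := hdeg b hb
                    omega
                  · rw [PySem.Set.contains_iff, PySem.Set.mem_ofList]
                    rwa [hcastj] at hk3
                · exact hcov2 k hka hkb hRk))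
            hmeas2
          exact this
      · rw [if_neg hdg]
        apply ih
        · refine ⟨hSym, hclen, hdlen, hdeg, fun x hx => hstk x (List.mem_append_left _ hx), ?_, hreach⟩
          intro k hRk
          have := hcov k hRk
          rcases List.mem_append.mp this with h | h
          · exact h
          · exfalso
            have hki : (k : Int) = i := List.mem_singleton.mp h
            apply hdg
            have hka : k = a := by omega
            have := hdeg k (by rw [← pvLive_length G cut]; exact hRk.1)
            rw [hka] at this
            rw [this]
            rw [← hka, hRk.2.1]
            rfl
        · have hlen1 : (stk' ++ [i]).length = stk'.length + 1 := by simp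
          omega

theorem pvAlt_eq_live (G : List (List Int)) (T : List Int) :
    delete_useless_alt G T =
      pvLive G (pvLoopB G (PySem.Set.ofList T) (G.length + pvTotLen G + 1)
        (List.replicate G.length PySem.Set.empty) (G.map (fun row => (row.length : Int)))
        ((PySem.List.pyRange 0 (G.length : Int)).filter
          (fun i => PySem.List.pyGetD (G.map (fun row => (row.length : Int))) i 0 == 1 &&
            !(PySem.Set.contains (PySem.Set.ofList T) i)))) := by
  apply pvExt (by simp [delete_useless_alt, pvLive_length])
  intro k hk
  have hkG : k < G.length := by simpa [delete_useless_alt] using hk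
  rw [pvLive_getD _ _ _ hkG]
  show (List.mapIdx _ G).getD k [] = _
  rw [pvGetD_lt _ _ _ (by simpa using hkG)]
  simp only [List.getElem_mapIdx]
  rw [PySem.List.pyGetD_of_nonneg _ _ (by omega : (0:Int) ≤ (k:Nat))]
  rw [Int.toNat_natCast]
  have hrow : G[k] = G.getD k [] := (pvGetD_lt G [] k hkG).symm
  set c := (pvLoopB G (PySem.Set.ofList T) (G.length + pvTotLen G + 1)
        (List.replicate G.length PySem.Set.empty) (G.map (fun row => (row.length : Int)))
        ((PySem.List.pyRange 0 (G.length : Int)).filter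
          (fun i => PySem.List.pyGetD (G.map (fun row => (row.length : Int))) i 0 == 1 &&
            !(PySem.Set.contains (PySem.Set.ofList T) i)))).getD k PySem.Set.empty with hc
  have hc2 : c = (pvLoopB G (PySem.Set.ofList T) (G.length + pvTotLen G + 1)
        (List.replicate G.length PySem.Set.empty) (G.map (fun row => (row.length : Int)))
        ((PySem.List.pyRange 0 (G.length : Int)).filter
          (fun i => PySem.List.pyGetD (G.map (fun row => (row.length : Int))) i 0 == 1 &&
            !(PySem.Set.contains (PySem.Set.ofList T) i)))).getD k [] := by
    by_cases hlt : k < (pvLoopB G (PySem.Set.ofList T) (G.length + pvTotLen G + 1)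
        (List.replicate G.length PySem.Set.empty) (G.map (fun row => (row.length : Int)))
        ((PySem.List.pyRange 0 (G.length : Int)).filter
          (fun i => PySem.List.pyGetD (G.map (fun row => (row.length : Int))) i 0 == 1 &&
            !(PySem.Set.contains (PySem.Set.ofList T) i)))).length
    · rw [hc, pvGetD_lt _ _ _ hlt, pvGetD_lt _ _ _ hlt]
    · rw [hc, List.getD_eq_getElem?_getD, List.getD_eq_getElem?_getD,
        List.getElem?_eq_none (by omega)]
      rfl
  rw [← hc2]
  split_ifs with he
  · rw [hrow.symm, he]
    simp [PySem.Set.contains]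
  · rw [hrow]

theorem pvInvB_init {G : List (List Int)} {T : List Int} (hInv : SimpleSymGraph G) :
    pvInvB G T (List.replicate G.length PySem.Set.empty) (G.map (fun row => (row.length : Int)))
      ((PySem.List.pyRange 0 (G.length : Int)).filter
        (fun i => PySem.List.pyGetD (G.map (fun row => (row.length : Int))) i 0 == 1 &&
          !(PySem.Set.contains (PySem.Set.ofList T) i))) := by
  have hdegk : ∀ k : Nat, k < G.length →
      (G.map (fun row => (row.length : Int))).getD k 0 = ((G.getD k []).length : Int) := by
    intro k hk
    rw [pvGetD_lt _ _ _ (by simpa using hk), pvGetD_lt _ _ _ hk]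
    simp
  refine ⟨by rw [pvLive_empty]; exact hInv, by simp, by simp, ?_, ?_, ?_, by rw [pvLive_empty]⟩
  · intro k hk
    rw [pvLive_empty]
    exact hdegk k hk
  · intro x hx
    rw [List.mem_filter] at hx
    obtain ⟨hxr, hxc⟩ := hx
    rw [PySem.List.mem_pyRange_one] at hxr
    refine ⟨hxr.1, hxr.2, ?_⟩
    have := (Bool.and_eq_true _ _).mp hxc
    have h2 := this.2
    rw [Bool.not_eq_eq_eq_not, Bool.not_true] at h2
    intro hmem
    have : PySem.Set.contains (PySem.Set.ofList T) x = true := by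
      rw [PySem.Set.contains_iff, PySem.Set.mem_ofList]; exact hmem
    rw [this] at h2
    simp at h2
  · intro k hRk
    rw [pvLive_empty] at hRk
    obtain ⟨hk1, hk2, hk3⟩ := hRk
    rw [List.mem_filter]
    constructor
    · rw [PySem.List.mem_pyRange_one]; omega
    · rw [Bool.and_eq_true]
      constructor
      · rw [PySem.List.pyGetD_of_nonneg _ _ (by omega : (0:Int) ≤ (k:Nat)), Int.toNat_natCast,
          hdegk k hk1, hk2]
        rfl
      · rw [Bool.not_eq_eq_eq_not, Bool.not_true]
        rw [← Bool.not_eq_true]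
        intro hcon
        rw [PySem.Set.contains_iff, PySem.Set.mem_ofList] at hcon
        exact hk3 hcon

theorem pvAlt_noop {G : List (List Int)} {T : List Int}
    (h : ∀ k : Nat, k < G.length → ¬ ((G.getD k []).length = 1 ∧ ¬ (k : Int) ∈ T)) :
    delete_useless_alt G T = G := by
  have hstack : ((PySem.List.pyRange 0 (G.length : Int)).filter
      (fun i => PySem.List.pyGetD (G.map (fun row => (row.length : Int))) i 0 == 1 &&
        !(PySem.Set.contains (PySem.Set.ofList T) i))) = [] := by
    rw [List.filter_eq_nil_iff]
    intro x hx
    rw [PySem.List.mem_pyRange_one] at hx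
    rw [Bool.and_eq_true]
    intro ⟨c1, c2⟩
    have hx0 : (x.toNat : Int) = x := Int.toNat_of_nonneg hx.1
    apply h x.toNat (by omega)
    constructor
    · rw [PySem.List.pyGetD_of_nonneg _ _ hx.1] at c1
      have : (G.map (fun row => (row.length : Int))).getD x.toNat 0 = ((G.getD x.toNat []).length : Int) := by
        rw [pvGetD_lt _ _ _ (by simpa using (by omega : x.toNat < G.length)), pvGetD_lt _ _ _ (by omega)]
        simp
      rw [this] at c1
      have := (beq_iff_eq).mp c1
      omega
    · rw [Bool.not_eq_eq_eq_not, Bool.not_true, ← Bool.not_eq_true] at c2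
      rw [hx0]
      intro hmem
      apply c2
      rw [PySem.Set.contains_iff, PySem.Set.mem_ofList]
      exact hmem
  rw [pvAlt_eq_live, hstack]
  have : pvLoopB G (PySem.Set.ofList T) (G.length + pvTotLen G + 1)
      (List.replicate G.length PySem.Set.empty) (G.map (fun row => (row.length : Int))) [] =
      List.replicate G.length PySem.Set.empty := by
    cases hf : G.length + pvTotLen G + 1 with
    | zero => omega
    | succ m => simp [pvLoopB]
  rw [this, pvLive_empty]

-- ===== VERDICT (by name: the statement is the Claim_ definition above) =====
theorem delete_useless_spec : Claim_equal_delete_useless := by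
  intro G T _ hPre
  unfold Spec_delete_useless
  rcases hPre with hInv | hNo
  · -- simple symmetric case: both ports compute a normal form reachable from G
    have hA := pvLoopA_spec (T := T) (n := G.length) (pvTotLen G + 1) G hInv rfl (by omega)
    have init := pvInvB_init (T := T) hInv
    have hfuel : (((PySem.List.pyRange 0 (G.length : Int)).filter
        (fun i => PySem.List.pyGetD (G.map (fun row => (row.length : Int))) i 0 == 1 &&
          !(PySem.Set.contains (PySem.Set.ofList T) i))).length) +
        pvTotLen (pvLive G (List.replicate G.length PySem.Set.empty)) < G.length + pvTotLen G + 1 := by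
      have h1 := List.length_filter_le
        (fun i => PySem.List.pyGetD (G.map (fun row => (row.length : Int))) i 0 == 1 &&
          !(PySem.Set.contains (PySem.Set.ofList T) i)) (PySem.List.pyRange 0 (G.length : Int))
      have h2 : (PySem.List.pyRange 0 (G.length : Int)).length = G.length := by
        rw [PySem.List.length_pyRange_one]
        omega
      rw [pvLive_empty]
      omega
    have hB := pvLoopB_spec (G := G) (T := T) (G.length + pvTotLen G + 1) _ _ _ init hfuel
    rw [delete_useless, pvAlt_eq_live]
    exact pvNF_unique hA.1 hB.1 hA.2 hB.2
  · -- no prunable leaf: both return G unchanged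
    have hA : delete_useless G T = G := by
      simp [delete_useless, pvLoopA, pvPassA_noop hNo]
    rw [hA, pvAlt_noop hNo]
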